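-- pv_equiv track=rewrite | github.com/ccpnmr/analysis | src/python/ccpn/core/lib/PeakClustering.py | _getPathByDFS
-- ===== SOURCE A (Python) =====
-- def _getPathByDFS(start, adjacents, nodes):
--     """
--     Ref: https://stackoverflow.com/questions/14607317/"""
--     path = []
--     q = [start]
--     while q:
--         node = q.pop(0)
--         if path.count(node) >= nodes.count(node):
--             continue
--         path = path + [node]
--         nextNodes = [p2 for p1,p2 in adjacents if p1 == node]
--         q = nextNodes + q
--     return path
-- ===== SOURCE B (Python) =====
-- def _getPathByDFS(start, adjacents, nodes):
--     # Recursive DFS: adjacency indexed once in a dict, multiplicity limits and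
--     # usage kept in counter dicts, path built by a recursive visit function
--     # (preorder recursion replaces A's explicit queue splicing with pop(0)).
--     limit = {}
--     for n in nodes:
--         limit[n] = limit.get(n, 0) + 1
--     adj = {}
--     for p1, p2 in adjacents:
--         adj.setdefault(p1, []).append(p2)
--     used = {}
--     path = []
--
--     def visit(node):
--         if used.get(node, 0) >= limit.get(node, 0):
--             return
--         used[node] = used.get(node, 0) + 1
--         path.append(node)
--         for nxt in adj.get(node, []):
--             visit(nxt)
--
--     visit(start)
--     return path
-- ===== Notes on version B (the rewrite author's own statement) =====
-- stated objective: alternative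
-- what changed: Replaces A's iterative queue loop (pop(0), repeated path.count/nodes.count scans, per-node adjacency filter, re-concatenating the queue) with a recursive preorder visit function over a pre-built adjacency index, tracking limits and usage in counter dicts.
import Mathlib
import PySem

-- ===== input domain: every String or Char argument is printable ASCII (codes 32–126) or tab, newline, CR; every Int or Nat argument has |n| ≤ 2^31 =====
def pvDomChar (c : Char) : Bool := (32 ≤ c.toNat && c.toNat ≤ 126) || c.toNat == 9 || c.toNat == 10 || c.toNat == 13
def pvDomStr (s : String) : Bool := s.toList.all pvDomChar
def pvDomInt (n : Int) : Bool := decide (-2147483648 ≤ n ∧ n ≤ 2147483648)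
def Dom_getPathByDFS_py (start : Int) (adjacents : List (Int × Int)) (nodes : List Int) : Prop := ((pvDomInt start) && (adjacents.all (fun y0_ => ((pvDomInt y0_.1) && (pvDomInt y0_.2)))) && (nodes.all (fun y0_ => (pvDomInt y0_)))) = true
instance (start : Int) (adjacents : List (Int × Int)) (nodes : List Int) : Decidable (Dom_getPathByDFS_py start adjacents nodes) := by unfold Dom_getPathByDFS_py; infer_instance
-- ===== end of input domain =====

-- B replaces A's iterative queue loop (pop(0), repeated path.count/nodes.count scans,
-- per-node adjacency filter, queue re-concatenation) with a recursive preorder visit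
-- function over a pre-built adjacency index, with limits/usage in counter dicts
-- (objective: alternative; same return value).
-- Both Python loops/recursions are ported with a fuel parameter as a totality guard only;
-- each fuel strictly exceeds the number of steps the Python performs (proved via the
-- measure pvMu below), so the ports compute exactly what the Pythons compute.

-- ===== PORT A =====
-- A's while loop: pop from the front of q, skip if path already holds enough copies,
-- else append to path and prepend this node's adjacency-filter comprehension to q.
def getPathByDFS_loopA (adjacents : List (Int × Int)) (nodes : List Int) :
    Nat → List Int → List Int → List Int
  | 0, path, _ => path
  | _ + 1, path, [] => path
  | fuel + 1, path, node :: q =>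
    if nodes.count node ≤ path.count node then
      getPathByDFS_loopA adjacents nodes fuel path q
    else
      getPathByDFS_loopA adjacents nodes fuel (path ++ [node])
        (((adjacents.filter (fun p => p.1 == node)).map (fun p => p.2)) ++ q)

def getPathByDFS_py (start : Int) (adjacents : List (Int × Int)) (nodes : List Int) : List Int :=
  getPathByDFS_loopA adjacents nodes ((nodes.length + 1) * (adjacents.length + 1) + 1) [] [start]

-- ===== PORT B =====
-- limit = {} ; for n in nodes: limit[n] = limit.get(n, 0) + 1
def pvLimitDict (nodes : List Int) : PySem.Dict Int Int :=
  nodes.foldl (fun d n => d.insert n (d.getD n 0 + 1)) PySem.Dict.empty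

-- adj = {} ; for p1, p2 in adjacents: adj.setdefault(p1, []).append(p2)
def pvAdjIndex (adjacents : List (Int × Int)) : PySem.Dict Int (List Int) :=
  adjacents.foldl (fun d p => d.modify p.1 [] (fun l => l ++ [p.2])) PySem.Dict.empty

-- Source B's recursive visit; the mutated closure variables (used, path) are threaded as a
-- state pair; the 'for nxt in adj.get(node, [])' body is the foldl over the children.
-- The fuel (nodes.length + 1 at the top call) strictly exceeds the recursion depth:
-- every visit call on the chain except the last incremented 'used', and the total of
-- all limits is nodes.length.
def getPathByDFS_visitB (adj : PySem.Dict Int (List Int)) (limit : PySem.Dict Int Int) :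
    Nat → PySem.Dict Int Int × List Int → Int → PySem.Dict Int Int × List Int
  | 0, st, _ => st
  | fuel + 1, (used, path), node =>
    if limit.getD node 0 ≤ used.getD node 0 then (used, path)
    else (adj.getD node []).foldl (getPathByDFS_visitB adj limit fuel)
      (used.insert node (used.getD node 0 + 1), path ++ [node])

def getPathByDFS_py_alt (start : Int) (adjacents : List (Int × Int)) (nodes : List Int) : List Int :=
  (getPathByDFS_visitB (pvAdjIndex adjacents) (pvLimitDict nodes) (nodes.length + 1)
    (PySem.Dict.empty, []) start).2

-- ===== PRECONDITION & SPEC =====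
def Spec_getPathByDFS_py (start : Int) (adjacents : List (Int × Int)) (nodes : List Int) (out : List Int) : Prop := out = getPathByDFS_py_alt start adjacents nodes
instance (start : Int) (adjacents : List (Int × Int)) (nodes : List Int) (out : List Int) : Decidable (Spec_getPathByDFS_py start adjacents nodes out) := by unfold Spec_getPathByDFS_py; infer_instance

-- ===== CLAIM (what is proved, stated in full; the proofs are below) =====
def Claim_equal_getPathByDFS_py : Prop := ∀ (start : Int) (adjacents : List (Int × Int)) (nodes : List Int), Dom_getPathByDFS_py start adjacents nodes → Spec_getPathByDFS_py start adjacents nodes (getPathByDFS_py start adjacents nodes)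

-- ===== LEMMAS AND PROOFS =====

-- measure of A's loop: strictly decreases at every iteration (proof-only helper)
def pvMu (adjLen nodesLen pathLen qLen : Nat) : Nat :=
  (nodesLen - pathLen) * (adjLen + 1) + qLen

-- the adjacency index looks up exactly A's per-node comprehension
lemma pvAdjIndex_foldl_getD (adjacents : List (Int × Int)) (d : PySem.Dict Int (List Int)) (x : Int) :
    (adjacents.foldl (fun d p => d.modify p.1 [] (fun l => l ++ [p.2])) d).getD x []
      = d.getD x [] ++ ((adjacents.filter (fun p => p.1 == x)).map (fun p => p.2)) := by
  induction adjacents generalizing d with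
  | nil => simp
  | cons p rest ih =>
    simp only [List.foldl_cons, ih, List.filter_cons]
    by_cases h : p.1 = x
    · subst h
      simp [PySem.Dict.getD_modify_self]
    · rw [PySem.Dict.getD_modify_of_ne _ [] _ (fun he => h he.symm)]
      simp [h]

lemma pvAdjIndex_getD (adjacents : List (Int × Int)) (x : Int) :
    (pvAdjIndex adjacents).getD x []
      = (adjacents.filter (fun p => p.1 == x)).map (fun p => p.2) := by
  simpa using pvAdjIndex_foldl_getD adjacents PySem.Dict.empty x

lemma pvLimitDict_getD (nodes : List Int) (x : Int) :
    (pvLimitDict nodes).getD x 0 = (nodes.count x : Int) := by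
  rw [pvLimitDict, PySem.Dict.foldl_insert_getD_add_one_eq_counter, PySem.Dict.getD_counter]

-- counting: pointwise count bound gives a length bound
lemma pv_count_le_length (path nodes : List Int)
    (h : ∀ m, path.count m ≤ nodes.count m) : path.length ≤ nodes.length :=
  (List.subperm_ext_iff.mpr (fun x _ => h x)).length_le

lemma pv_bound_push (path nodes : List Int) (node : Int)
    (h : ∀ m, path.count m ≤ nodes.count m) (hs : path.count node < nodes.count node) :
    ∀ m, (path ++ [node]).count m ≤ nodes.count m := by
  intro m
  by_cases hm : m = node
  · subst hm; simp [List.count_append]; omega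
  · simp [List.count_append, Ne.symm hm]
    exact h m

lemma pv_strict_len (path nodes : List Int) (node : Int)
    (h : ∀ m, path.count m ≤ nodes.count m) (hs : path.count node < nodes.count node) :
    path.length < nodes.length := by
  have := pv_count_le_length (path ++ [node]) nodes (pv_bound_push path nodes node h hs)
  simp at this; omega

-- A's children list is short
lemma pv_children_len (adjacents : List (Int × Int)) (node : Int) :
    ((adjacents.filter (fun p => p.1 == node)).map (fun p => p.2)).length ≤ adjacents.length := by
  simpa using List.length_filter_le (fun p => p.1 == node) adjacents

-- A's loop is fuel-irrelevant once the fuel exceeds the measure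
lemma loopA_irrel (adjacents : List (Int × Int)) (nodes : List Int) :
    ∀ (fa fa' : Nat) (path q : List Int),
      (∀ m, path.count m ≤ nodes.count m) →
      pvMu adjacents.length nodes.length path.length q.length < fa →
      pvMu adjacents.length nodes.length path.length q.length < fa' →
      getPathByDFS_loopA adjacents nodes fa path q = getPathByDFS_loopA adjacents nodes fa' path q := by
  intro fa
  induction fa with
  | zero => intro fa' path q _ h _; exact absurd h (by omega)
  | succ f ih =>
    intro fa' path q hb h h'
    match fa', q with
    | 0, _ => exact absurd h' (by omega)
    | f' + 1, [] => rfl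
    | f' + 1, node :: q =>
      simp only [getPathByDFS_loopA]
      by_cases hc : nodes.count node ≤ path.count node
      · rw [if_pos hc, if_pos hc]
        exact ih f' path q hb (by simp [pvMu] at h ⊢; omega) (by simp [pvMu] at h' ⊢; omega)
      · rw [if_neg hc, if_neg hc]
        rw [not_le] at hc
        have hlen := pv_strict_len path nodes node hb hc
        have hch := pv_children_len adjacents node
        have hb' := pv_bound_push path nodes node hb hc
        have hd : nodes.length - path.length = (nodes.length - (path.length + 1)) + 1 := by
          omega
        refine ih f' _ _ hb' ?_ ?_
        · simp only [pvMu, List.length_append, List.length_cons, List.length_nil, zero_add,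
            List.length_map] at h hch ⊢
          rw [hd, Nat.succ_mul] at h
          omega
        · simp only [pvMu, List.length_append, List.length_cons, List.length_nil, zero_add,
            List.length_map] at h' hch ⊢
          rw [hd, Nat.succ_mul] at h'
          omega

-- bridging lemma: running A's loop on xs ++ q equals folding B's visit over xs first,
-- with all invariants preserved (used mirrors path's counts, counts stay bounded,
-- path only grows)
lemma bridge (adjacents : List (Int × Int)) (nodes : List Int) :
    ∀ (fb : Nat) (xs : List Int) (used : PySem.Dict Int Int) (path q : List Int) (fa : Nat),
      (∀ m, used.getD m 0 = (path.count m : Int)) →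
      (∀ m, path.count m ≤ nodes.count m) →
      pvMu adjacents.length nodes.length path.length (xs ++ q).length < fa →
      nodes.length - path.length < fb →
      (letI st := xs.foldl (getPathByDFS_visitB (pvAdjIndex adjacents) (pvLimitDict nodes) fb) (used, path)
       getPathByDFS_loopA adjacents nodes fa path (xs ++ q)
          = getPathByDFS_loopA adjacents nodes (pvMu adjacents.length nodes.length st.2.length q.length + 1) st.2 q
        ∧ (∀ m, st.1.getD m 0 = (st.2.count m : Int))
        ∧ (∀ m, st.2.count m ≤ nodes.count m)
        ∧ path.length ≤ st.2.length) := by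
  intro fb
  induction fb with
  | zero => intro xs used path q fa _ _ _ hr; exact absurd hr (by omega)
  | succ k ihfb =>
    intro xs
    induction xs with
    | nil =>
      intro used path q fa hinv hb hmu _
      simp only [List.foldl_nil, List.nil_append] at hmu ⊢
      exact ⟨loopA_irrel adjacents nodes fa _ path q hb hmu (by omega), hinv, hb, le_refl _⟩
    | cons node xs ihxs =>
      intro used path q fa hinv hb hmu hr
      obtain _ | fa := fa
      · exact absurd hmu (by omega)
      rw [List.cons_append, List.foldl_cons]
      by_cases hc : nodes.count node ≤ path.count node
      · have hhead : getPathByDFS_visitB (pvAdjIndex adjacents) (pvLimitDict nodes) (k + 1)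
            (used, path) node = (used, path) := by
          simp only [getPathByDFS_visitB]
          rw [if_pos (by rw [pvLimitDict_getD, hinv node]; exact_mod_cast hc)]
        have hA : getPathByDFS_loopA adjacents nodes (fa + 1) path (node :: (xs ++ q))
            = getPathByDFS_loopA adjacents nodes fa path (xs ++ q) := by
          simp only [getPathByDFS_loopA]
          rw [if_pos hc]
        rw [hA, hhead]
        exact ihxs used path q fa hinv hb
          (by simp only [pvMu, List.length_cons, List.length_append] at hmu ⊢; omega) hr
      · rw [not_le] at hc
        have hlen := pv_strict_len path nodes node hb hc
        have hch := pv_children_len adjacents node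
        have hb' := pv_bound_push path nodes node hb hc
        have hhead : getPathByDFS_visitB (pvAdjIndex adjacents) (pvLimitDict nodes) (k + 1)
            (used, path) node
            = List.foldl (getPathByDFS_visitB (pvAdjIndex adjacents) (pvLimitDict nodes) k)
                (used.insert node (used.getD node 0 + 1), path ++ [node])
                ((adjacents.filter (fun p => p.1 == node)).map (fun p => p.2)) := by
          simp only [getPathByDFS_visitB]
          rw [if_neg (by rw [pvLimitDict_getD, hinv node]; exact_mod_cast not_le.mpr hc),
            pvAdjIndex_getD]
        have hA : getPathByDFS_loopA adjacents nodes (fa + 1) path (node :: (xs ++ q))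
            = getPathByDFS_loopA adjacents nodes fa (path ++ [node])
                (((adjacents.filter (fun p => p.1 == node)).map (fun p => p.2)) ++ (xs ++ q)) := by
          simp only [getPathByDFS_loopA]
          rw [if_neg (not_le.mpr hc)]
        rw [hA, hhead]
        have hinv' : ∀ m, (used.insert node (used.getD node 0 + 1)).getD m 0
            = (((path ++ [node]).count m : Int)) := by
          intro m
          by_cases hm : m = node
          · rw [hm, PySem.Dict.getD_insert_self, hinv node]
            simp [List.count_append]
          · rw [PySem.Dict.getD_insert_of_ne (k := node) (k' := m) _ _ _ hm, hinv m]
            simp [List.count_append, Ne.symm hm]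
        have hmu1 : pvMu adjacents.length nodes.length (path ++ [node]).length
            ((((adjacents.filter (fun p => p.1 == node)).map (fun p => p.2)) ++ (xs ++ q)).length)
            < fa := by
          simp only [pvMu, List.length_append, List.length_cons, List.length_nil, zero_add,
            List.length_map] at hmu hch ⊢
          have hd : nodes.length - path.length = (nodes.length - (path.length + 1)) + 1 := by
            omega
          rw [hd, Nat.succ_mul] at hmu
          omega
        have h1 := ihfb ((adjacents.filter (fun p => p.1 == node)).map (fun p => p.2))
          (used.insert node (used.getD node 0 + 1)) (path ++ [node]) (xs ++ q) fa
          hinv' hb' hmu1 (by simp only [List.length_append, List.length_cons, List.length_nil, zero_add]; omega)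
        obtain ⟨heq1, hinv1, hb1, hlen1⟩ := h1
        have h2 := ihxs _ _ q
          (pvMu adjacents.length nodes.length
            (List.foldl (getPathByDFS_visitB (pvAdjIndex adjacents) (pvLimitDict nodes) k)
              (used.insert node (used.getD node 0 + 1), path ++ [node])
              ((adjacents.filter (fun p => p.1 == node)).map (fun p => p.2))).2.length
            (xs ++ q).length + 1)
          hinv1 hb1 (by omega)
          (by
            simp only [List.length_append, List.length_cons, List.length_nil, zero_add] at hlen1
            omega)
        obtain ⟨heq2, hinv2, hb2, hlen2⟩ := h2
        refine ⟨heq1.trans heq2, hinv2, hb2, ?_⟩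
        calc path.length ≤ (path ++ [node]).length := by simp
          _ ≤ _ := hlen1
          _ ≤ _ := hlen2

-- ===== VERDICT (by name: the statement is the Claim_ definition above) =====
theorem getPathByDFS_py_spec : Claim_equal_getPathByDFS_py := by
  intro start adjacents nodes _
  unfold Spec_getPathByDFS_py getPathByDFS_py getPathByDFS_py_alt
  have h := bridge adjacents nodes (nodes.length + 1) [start] PySem.Dict.empty [] []
    ((nodes.length + 1) * (adjacents.length + 1) + 1)
    (by simp) (by simp) (by simp [pvMu]) (by omega)
  simp only [List.append_nil, List.foldl_cons, List.foldl_nil] at h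
  rw [h.1]
  rfl
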